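-- pv_equiv track=rewrite | github.com/c940606/leetcode | weekly contest/第189场周赛/3.py | peopleIndexes
-- ===== SOURCE A (Python) =====
-- from typing import List
--
-- def peopleIndexes(favoriteCompanies: List[List[str]]) -> List[int]:
--     cf = [set(tmp) for tmp in favoriteCompanies]
--
--     n = len(cf)
--     res = []
--     for i in range(n):
--         flag = False
--         for j in range(n):
--             if i == j: continue
--             if len(cf[i]) <= len(cf[j]) and cf[i].issubset(cf[j]):
--                 flag = True
--                 break
--         if not flag:
--             res.append(i)
--     return res
-- ===== SOURCE B (Python) =====
-- from typing import List
--
-- def peopleIndexes(favoriteCompanies: List[List[str]]) -> List[int]: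
--     n = len(favoriteCompanies)
--     # inverted index: company -> set of people listing it
--     idx = {}
--     for i, comps in enumerate(favoriteCompanies):
--         for c in comps:
--             idx.setdefault(c, set()).add(i)
--     res = []
--     for i, comps in enumerate(favoriteCompanies):
--         cand = set(range(n))
--         for c in comps:
--             cand &= idx[c]
--         cand.discard(i)
--         if not cand:
--             res.append(i)
--     return res
-- ===== Notes on version B (the rewrite author's own statement) =====
-- stated objective: alternative
-- what changed: Replaces the all-pairs subset test (for each person, scan every other person and check set inclusion) by an inverted index company->people: each person's dominators are the intersection of the index sets of their companies, so no pairwise subset checks are performed.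
import Mathlib
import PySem

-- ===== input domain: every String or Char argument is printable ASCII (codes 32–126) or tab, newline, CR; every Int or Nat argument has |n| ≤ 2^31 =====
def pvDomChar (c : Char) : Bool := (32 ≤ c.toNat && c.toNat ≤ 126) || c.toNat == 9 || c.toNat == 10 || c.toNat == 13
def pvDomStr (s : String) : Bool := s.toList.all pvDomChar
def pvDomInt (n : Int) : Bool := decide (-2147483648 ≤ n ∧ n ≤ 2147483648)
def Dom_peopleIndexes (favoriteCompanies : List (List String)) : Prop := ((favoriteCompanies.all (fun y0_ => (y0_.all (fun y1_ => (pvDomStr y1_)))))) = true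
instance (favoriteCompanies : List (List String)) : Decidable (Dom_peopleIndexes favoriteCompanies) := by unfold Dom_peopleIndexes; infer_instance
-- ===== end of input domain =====

-- ===== PORT A =====
-- For each person i scan all other persons j and drop i if cf[i] is a subset of cf[j].
def peopleIndexes (favoriteCompanies : List (List String)) : List Int :=
  let cf : List (PySem.Set String) := favoriteCompanies.map (fun tmp => PySem.Set.ofList tmp)
  let n : Int := (cf.length : Int)
  (PySem.List.pyRange 0 n).foldl (fun res i =>
    let flag := (PySem.List.pyRange 0 n).any (fun j =>
      if i == j then false
      else decide (PySem.Set.len (PySem.List.pyGetD cf i PySem.Set.empty)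
                     ≤ PySem.Set.len (PySem.List.pyGetD cf j PySem.Set.empty))
           && PySem.Set.issubset (PySem.List.pyGetD cf i PySem.Set.empty)
                (PySem.List.pyGetD cf j PySem.Set.empty))
    if flag then res else res ++ [i]) []

-- ===== PORT B =====
-- Inverted index company -> set of people; person i survives iff the intersection of the
-- index sets over i's companies, minus i itself, is empty.
def peopleIndexes_alt (favoriteCompanies : List (List String)) : List Int :=
  let n : Int := (favoriteCompanies.length : Int)
  let idx : PySem.Dict String (PySem.Set Int) :=
    (PySem.List.enumerate favoriteCompanies).foldl (fun d p =>
      p.2.foldl (fun d c => d.modify c PySem.Set.empty (fun s => PySem.Set.add s p.1)) d)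
      PySem.Dict.empty
  (PySem.List.enumerate favoriteCompanies).foldl (fun res p =>
    let cand := p.2.foldl (fun cand c => PySem.Set.inter cand (idx.getD c PySem.Set.empty))
      (PySem.Set.ofList (PySem.List.pyRange 0 n))
    if PySem.Set.discard cand p.1 = [] then res ++ [p.1] else res) []

-- ===== PRECONDITION & SPEC =====
def Spec_peopleIndexes (favoriteCompanies : List (List String)) (out : List Int) : Prop := out = peopleIndexes_alt favoriteCompanies
instance (favoriteCompanies : List (List String)) (out : List Int) : Decidable (Spec_peopleIndexes favoriteCompanies out) := by unfold Spec_peopleIndexes; infer_instance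

-- ===== CLAIM (what is proved, stated in full; the proofs are below) =====
def Claim_equal_peopleIndexes : Prop := ∀ (favoriteCompanies : List (List String)), Dom_peopleIndexes favoriteCompanies → Spec_peopleIndexes favoriteCompanies (peopleIndexes favoriteCompanies)

-- ===== LEMMAS AND PROOFS =====


-- the common characterisation: person i is dominated by some other person j
def Dominated (favoriteCompanies : List (List String)) (i : Int) : Prop :=
  ∃ k : Nat, k < favoriteCompanies.length ∧ (k : Int) ≠ i ∧
    ∀ c ∈ favoriteCompanies[i.toNat]?.getD [], c ∈ favoriteCompanies[k]?.getD []

-- membership in the inverted-index build (flat list of (company, person) pairs)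
theorem mem_getD_foldl_modify_add (qs : List (String × Int))
    (d : PySem.Dict String (PySem.Set Int)) (c : String) (j : Int) :
    (j ∈ (qs.foldl (fun d q => d.modify q.1 PySem.Set.empty
            (fun s => PySem.Set.add s q.2)) d).getD c PySem.Set.empty) ↔
      j ∈ d.getD c PySem.Set.empty ∨ ∃ q ∈ qs, q.1 = c ∧ q.2 = j := by
  induction qs generalizing d with
  | nil => simp
  | cons q qs ih =>
    simp only [List.foldl_cons, ih, PySem.Dict.getD_modify, List.mem_cons]
    by_cases hc : c = q.1
    · subst hc
      simp [PySem.Set.mem_add]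
      tauto
    · rw [if_neg hc]
      constructor
      · rintro (h | ⟨q', hq', h1, h2⟩)
        · exact Or.inl h
        · exact Or.inr ⟨q', Or.inr hq', h1, h2⟩
      · rintro (h | ⟨q', (rfl | hq'), h1, h2⟩)
        · exact Or.inl h
        · exact absurd h1.symm hc
        · exact Or.inr ⟨q', hq', h1, h2⟩

-- membership in the intersection loop
theorem mem_foldl_inter (cs : List String) (g : String → PySem.Set Int)
    (s0 : PySem.Set Int) (j : Int) :
    (j ∈ cs.foldl (fun s c => PySem.Set.inter s (g c)) s0) ↔
      j ∈ s0 ∧ ∀ c ∈ cs, j ∈ g c := by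
  induction cs generalizing s0 with
  | nil => simp
  | cons c cs ih =>
    simp only [List.foldl_cons, ih, PySem.Set.mem_inter, List.mem_cons]
    constructor
    · rintro ⟨⟨h0, hc⟩, h⟩
      exact ⟨h0, fun c' hc' => hc'.elim (fun e => e ▸ hc) (h c')⟩
    · rintro ⟨h0, h⟩
      exact ⟨⟨h0, h c (Or.inl rfl)⟩, fun c' hc' => h c' (Or.inr hc')⟩

-- a nodup list included in another list is no longer than it
theorem nodup_subset_length_le {l l2 : List String} (h : l.Nodup)
    (hs : ∀ x ∈ l, x ∈ l2) : l.length ≤ l2.length := by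
  calc l.length = l.toFinset.card := (List.toFinset_card_of_nodup h).symm
  _ ≤ l2.toFinset.card := Finset.card_le_card (fun x hx => by
        simp only [List.mem_toFinset] at hx ⊢; exact hs x hx)
  _ ≤ l2.length := l2.toFinset_card_le

-- the inverted index that B builds (proof-side name for the let-bound dict in the port)
def pvIdx (favoriteCompanies : List (List String)) : PySem.Dict String (PySem.Set Int) :=
  (PySem.List.enumerate favoriteCompanies).foldl (fun d p =>
    p.2.foldl (fun d c => d.modify c PySem.Set.empty (fun s => PySem.Set.add s p.1)) d)
    PySem.Dict.empty

theorem mem_pvIdx (fav : List (List String)) (c : String) (j : Int) :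
    (j ∈ (pvIdx fav).getD c PySem.Set.empty) ↔
      ∃ k : Nat, k < fav.length ∧ j = (k : Int) ∧ c ∈ fav[k]?.getD [] := by
  unfold pvIdx
  have h1 : ∀ (d : PySem.Dict String (PySem.Set Int)) (p : Int × List String),
      p.2.foldl (fun d c => d.modify c PySem.Set.empty (fun s => PySem.Set.add s p.1)) d
        = (p.2.map (fun c' => (c', p.1))).foldl
            (fun d q => d.modify q.1 PySem.Set.empty (fun s => PySem.Set.add s q.2)) d := by
    intro d p; rw [List.foldl_map]
  simp only [h1]
  rw [← List.foldl_flatMap]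
  rw [mem_getD_foldl_modify_add]
  simp only [PySem.Dict.getD_empty, List.mem_flatMap, List.mem_map,
    PySem.List.mem_enumerate_iff]
  constructor
  · rintro (h | ⟨q, ⟨p, ⟨k, hk, rfl⟩, c', hc', rfl⟩, rfl, rfl⟩)
    · simp [PySem.Set.empty] at h
    · exact ⟨k, hk, by simp, by simp [List.getElem?_eq_getElem hk, hc']⟩
  · rintro ⟨k, hk, rfl, hc⟩
    refine Or.inr ⟨(c, (k : Int)), ⟨((k : Int), fav[k]), ⟨k, hk, by simp⟩, c, ?_, rfl⟩, rfl, rfl⟩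
    simpa [List.getElem?_eq_getElem hk] using hc

theorem flag_iff (fav : List (List String)) (i : Int) (h0 : 0 ≤ i)
    (h1 : i < (fav.length : Int)) :
    ((PySem.List.pyRange 0 (fav.length : Int)).any
      (fun j =>
        if i == j then false
        else decide (PySem.Set.len (PySem.List.pyGetD (fav.map (fun tmp => PySem.Set.ofList tmp)) i PySem.Set.empty)
               ≤ PySem.Set.len (PySem.List.pyGetD (fav.map (fun tmp => PySem.Set.ofList tmp)) j PySem.Set.empty))
             && PySem.Set.issubset (PySem.List.pyGetD (fav.map (fun tmp => PySem.Set.ofList tmp)) i PySem.Set.empty)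
                  (PySem.List.pyGetD (fav.map (fun tmp => PySem.Set.ofList tmp)) j PySem.Set.empty)) = true)
      ↔ Dominated fav i := by
  have hi' : i.toNat < fav.length := by omega
  have hgi : PySem.List.pyGetD (fav.map (fun tmp => PySem.Set.ofList tmp)) i PySem.Set.empty
      = PySem.Set.ofList fav[i.toNat] := by
    rw [PySem.List.pyGetD_eq_getElem (fav.map (fun tmp => PySem.Set.ofList tmp)) PySem.Set.empty h0 (by simpa using h1)]; simp
  rw [List.any_eq_true]
  constructor
  · rintro ⟨j, hj, hcond⟩
    rw [PySem.List.mem_pyRange_one] at hj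
    have hj' : j.toNat < fav.length := by omega
    have hgj : PySem.List.pyGetD (fav.map (fun tmp => PySem.Set.ofList tmp)) j PySem.Set.empty
        = PySem.Set.ofList fav[j.toNat] := by
      rw [PySem.List.pyGetD_eq_getElem (fav.map (fun tmp => PySem.Set.ofList tmp)) PySem.Set.empty hj.1 (by simp; omega)]; simp
    by_cases hij : i == j
    · rw [if_pos hij] at hcond; exact absurd hcond (by simp)
    · rw [if_neg hij] at hcond
      rw [Bool.and_eq_true, hgi, hgj, PySem.Set.issubset_iff] at hcond
      refine ⟨j.toNat, hj', ?_, ?_⟩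
      · simp only [beq_iff_eq] at hij; omega
      · intro c hc
        have : c ∈ PySem.Set.ofList fav[i.toNat] := by
          rw [PySem.Set.mem_ofList]
          simpa [List.getElem?_eq_getElem hi'] using hc
        have := hcond.2 c this
        rw [PySem.Set.mem_ofList] at this
        simp [List.getElem?_eq_getElem hj', this]
  · rintro ⟨k, hk, hne, hsub⟩
    have hgj : PySem.List.pyGetD (fav.map (fun tmp => PySem.Set.ofList tmp)) (k : Int) PySem.Set.empty
        = PySem.Set.ofList fav[k] := by
      rw [PySem.List.pyGetD_eq_getElem (fav.map (fun tmp => PySem.Set.ofList tmp)) PySem.Set.empty (by omega)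
            (by simpa using (by exact_mod_cast hk : (k:Int) < (fav.length:Int)))]
      simp
    have hsub' : ∀ x ∈ PySem.Set.ofList fav[i.toNat], x ∈ PySem.Set.ofList fav[k] := by
      intro x hx
      rw [PySem.Set.mem_ofList] at hx ⊢
      have := hsub x (by simpa [List.getElem?_eq_getElem hi'] using hx)
      simpa [List.getElem?_eq_getElem hk] using this
    refine ⟨(k : Int), ?_, ?_⟩
    · rw [PySem.List.mem_pyRange_one]; exact ⟨by omega, by exact_mod_cast hk⟩
    · rw [if_neg (by simpa using hne.symm)]
      rw [Bool.and_eq_true, hgi, hgj, PySem.Set.issubset_iff]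
      refine ⟨?_, hsub'⟩
      rw [decide_eq_true_iff]
      show PySem.Set.len _ ≤ PySem.Set.len _
      simp only [PySem.Set.len]
      exact_mod_cast nodup_subset_length_le (PySem.Set.nodup_ofList _) hsub'

theorem cand_iff (fav : List (List String)) (i : Int) (h0 : 0 ≤ i)
    (h1 : i < (fav.length : Int)) :
    (PySem.Set.discard
        ((PySem.List.pyGetD fav i []).foldl
          (fun cand c => PySem.Set.inter cand ((pvIdx fav).getD c PySem.Set.empty))
          (PySem.Set.ofList (PySem.List.pyRange 0 (fav.length : Int)))) i = [])
      ↔ ¬ Dominated fav i := by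
  have hi' : i.toNat < fav.length := by omega
  have hgi : PySem.List.pyGetD fav i [] = fav[i.toNat] :=
    PySem.List.pyGetD_eq_getElem _ _ h0 h1
  rw [List.eq_nil_iff_forall_not_mem]
  unfold Dominated
  constructor
  · rintro h ⟨k, hk, hne, hsub⟩
    refine h (k : Int) ?_
    rw [PySem.Set.mem_discard, mem_foldl_inter, PySem.Set.mem_ofList,
      PySem.List.mem_pyRange_one]
    refine ⟨⟨⟨by omega, by exact_mod_cast hk⟩, ?_⟩, hne⟩
    intro c hc
    rw [mem_pvIdx]
    refine ⟨k, hk, rfl, ?_⟩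
    rw [hgi] at hc
    have := hsub c (by simpa [List.getElem?_eq_getElem hi'] using hc)
    exact this
  · intro h j hj
    rw [PySem.Set.mem_discard, mem_foldl_inter, PySem.Set.mem_ofList,
      PySem.List.mem_pyRange_one] at hj
    obtain ⟨⟨⟨hj0, hjn⟩, hall⟩, hne⟩ := hj
    refine h ⟨j.toNat, by omega, by omega, ?_⟩
    intro c hc
    have := hall c (by rw [hgi]; simpa [List.getElem?_eq_getElem hi'] using hc)
    rw [mem_pvIdx] at this
    obtain ⟨k, hk, hjk, hck⟩ := this
    have : j.toNat = k := by omega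
    subst this
    exact hck

-- the append-on-false loop of port A is a filter on the negated test
theorem foldl_if_not (l : List Int) (p : Int → Bool) (acc : List Int) :
    l.foldl (fun res i => if p i then res else res ++ [i]) acc
      = acc ++ l.filter (fun i => !p i) := by
  rw [show (fun (res : List Int) (i : Int) => if p i then res else res ++ [i])
        = fun res i => if (!p i) = true then res ++ [i] else res from
      funext fun res => funext fun i => by cases p i <;> simp]
  rw [PySem.List.foldl_append_if (fun i => !p i) (fun i => i)]
  simp

-- Bool bridge used pointwise under the filter
theorem bool_decide_helper {p : Bool} {Q D : Prop} [Decidable Q]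
    (hf : p = true ↔ D) (hc : Q ↔ ¬ D) : (!p) = decide Q := by
  cases p <;> simp_all

-- the append-on-empty loop of port B is a filter
theorem foldl_if_nil (l : List Int) (g : Int → PySem.Set Int) (acc : List Int) :
    l.foldl (fun res j => if PySem.Set.discard (g j) j = [] then res ++ [j] else res) acc
      = acc ++ l.filter (fun j => decide (PySem.Set.discard (g j) j = [])) := by
  rw [PySem.List.foldl_append_ite (p := fun j => PySem.Set.discard (g j) j = [])
    (f := fun j : Int => j)]
  simp

-- ===== VERDICT (by name: the statement is the Claim_ definition above) =====
theorem peopleIndexes_spec : Claim_equal_peopleIndexes := by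
  intro fav _
  show peopleIndexes fav = peopleIndexes_alt fav
  simp only [peopleIndexes, peopleIndexes_alt]
  rw [show (List.foldl (fun d p =>
        p.2.foldl (fun d c => d.modify c PySem.Set.empty (fun s => PySem.Set.add s p.1)) d)
        PySem.Dict.empty (PySem.List.enumerate fav)) = pvIdx fav from rfl]
  rw [PySem.List.enumerate_eq_map_pyRange fav []]
  simp only [List.foldl_map]
  rw [foldl_if_not, foldl_if_nil]
  simp only [List.nil_append, List.length_map, PySem.List.len]
  apply List.filter_congr
  intro i hi
  rw [PySem.List.mem_pyRange_one] at hi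
  exact bool_decide_helper (flag_iff fav i hi.1 hi.2) (cand_iff fav i hi.1 hi.2)
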